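-- pv_equiv track=rewrite | github.com/sbauza/AdventOfCode | 2015/day1/script.py | get_basement_pos
-- ===== SOURCE A (Python) =====
-- def get_basement_pos(input):
--     index = 1
--     floor = 0
--     for char in input:
--         if char == '(':
--             floor += 1
--         if char == ')':
--             floor -= 1
--         if floor == -1:
--             break
--         index += 1
--     return index
-- ===== SOURCE B (Python) =====
-- def get_basement_pos(input):
--     # Two passes: build the list of cumulative floors, then find the first -1.
--     prefix = []
--     floor = 0
--     for c in input:
--         floor += 1 if c == '(' else -1 if c == ')' else 0
--         prefix.append(floor)
--     try:
--         return prefix.index(-1) + 1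
--     except ValueError:
--         return len(input) + 1
-- ===== Notes on version B (the rewrite author's own statement) =====
-- stated objective: alternative
-- what changed: Replaces A's fused single loop with early break by a two-pass decomposition: build the list of cumulative floors, then locate the first -1 with list.index.
import Mathlib
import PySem

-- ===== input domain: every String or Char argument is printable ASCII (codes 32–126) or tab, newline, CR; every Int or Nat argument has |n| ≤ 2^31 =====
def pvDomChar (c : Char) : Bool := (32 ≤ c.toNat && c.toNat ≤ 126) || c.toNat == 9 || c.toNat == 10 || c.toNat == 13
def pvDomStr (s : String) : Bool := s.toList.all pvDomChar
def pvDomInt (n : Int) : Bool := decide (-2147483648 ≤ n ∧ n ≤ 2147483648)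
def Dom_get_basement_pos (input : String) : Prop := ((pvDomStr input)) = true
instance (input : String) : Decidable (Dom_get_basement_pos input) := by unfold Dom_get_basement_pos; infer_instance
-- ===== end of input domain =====

-- B replaces A's fused single loop (early break) by a two-pass decomposition: build the
-- list of cumulative floors, then find the first -1 with list.index; same cost, alternative structure.


-- ===== PORT A =====
-- literal transliteration of A's loop with its early break
def pvGoA : List Char → Int → Int → Int
  | [], index, _ => index
  | c :: rest, index, floor =>
    let floor := if c = '(' then floor + 1 else floor
    let floor := if c = ')' then floor - 1 else floor
    if floor = -1 then index else pvGoA rest (index + 1) floor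

def get_basement_pos (input : String) : Int :=
  pvGoA input.toList 1 0

-- ===== PORT B =====
-- the prefix-building loop of Source B: floor += delta; prefix.append(floor)
def pvGoB : List Char → Int → List Int → List Int
  | [], _, pre => pre
  | c :: rest, floor, pre =>
    let floor := floor + (if c = '(' then 1 else if c = ')' then -1 else 0)
    pvGoB rest floor (pre ++ [floor])

def get_basement_pos_alt (input : String) : Int :=
  let pre := pvGoB input.toList 0 []
  match PySem.List.index? pre (-1 : Int) with
  | some k => (k : Int) + 1
  | none => (input.toList.length : Int) + 1

-- ===== PRECONDITION & SPEC =====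
def Spec_get_basement_pos (input : String) (out : Int) : Prop := out = get_basement_pos_alt input
instance (input : String) (out : Int) : Decidable (Spec_get_basement_pos input out) := by unfold Spec_get_basement_pos; infer_instance

-- ===== CLAIM (what is proved, stated in full; the proofs are below) =====
def Claim_equal_get_basement_pos : Prop := ∀ (input : String), Dom_get_basement_pos input → Spec_get_basement_pos input (get_basement_pos input)

-- ===== LEMMAS AND PROOFS =====

-- per-character delta
def pvDelta (c : Char) : Int := if c = '(' then 1 else if c = ')' then -1 else 0

-- the list of cumulative floors starting from f
def pvPref (f : Int) : List Char → List Int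
  | [] => []
  | c :: cs => (f + pvDelta c) :: pvPref (f + pvDelta c) cs

theorem pvGoB_eq_pref (cs : List Char) : ∀ (f : Int) (acc : List Int),
    pvGoB cs f acc = acc ++ pvPref f cs := by
  induction cs with
  | nil => intro f acc; simp [pvGoB, pvPref]
  | cons c cs ih =>
    intro f acc
    simp only [pvGoB, pvPref, pvDelta, ih, List.append_assoc, List.singleton_append]

-- A's two sequential ifs update floor by exactly pvDelta
theorem pvStep_eq (c : Char) (f : Int) :
    (if c = ')' then (if c = '(' then f + 1 else f) - 1 else (if c = '(' then f + 1 else f))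
      = f + pvDelta c := by
  by_cases h1 : c = '('
  · subst h1; simp [pvDelta]
  · by_cases h2 : c = ')'
    · simp [pvDelta, h2]; ring
    · simp [pvDelta, h1, h2]

theorem pvGoA_char (cs : List Char) : ∀ (f i : Int),
    pvGoA cs i f =
      (match PySem.List.index? (pvPref f cs) (-1 : Int) with
        | some k => i + (k : Int)
        | none => i + (cs.length : Int)) := by
  induction cs with
  | nil =>
    intro f i
    rw [show PySem.List.index? (pvPref f []) (-1 : Int) = none from rfl]
    simp [pvGoA]
  | cons c cs ih =>
    intro f i
    have hstep := pvStep_eq c f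
    simp only [pvGoA, pvPref]
    rw [hstep]
    by_cases hf : f + pvDelta c = -1
    · rw [if_pos hf, hf, PySem.List.index?_cons_self]
      norm_num
    · rw [if_neg hf, PySem.List.index?_cons_of_ne _ hf, ih (f + pvDelta c) (i + 1)]
      cases h : PySem.List.index? (pvPref (f + pvDelta c) cs) (-1 : Int) with
      | none => simp; ring
      | some k => simp; ring

-- ===== VERDICT (by name: the statement is the Claim_ definition above) =====
theorem get_basement_pos_spec : Claim_equal_get_basement_pos := by
  intro input _
  unfold Spec_get_basement_pos get_basement_pos get_basement_pos_alt
  rw [pvGoB_eq_pref, List.nil_append, pvGoA_char]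
  rw [PySem.List.index?_eq_idxOf?]
  cases h : List.idxOf? (-1 : Int) (pvPref 0 input.toList) with
  | none => simp [h]; ring
  | some k => simp [h]; ring
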